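-- pv_equiv track=rewrite | github.com/SergioQuintanillaGracia/periodic-table-practice | main.py | get_real_position
-- ===== SOURCE A (Python) =====
-- elements =[
-- ["h", None, None, None, None, None, None, "he"],
-- ["li", "be", "b", "c", "n", "o", "f", "ne"],
-- ["na", "mg", "al", "si", "p", "s", "cl", "ar"],
-- ["k", "ca", "ga", "ge", "as", "se", "br", "kr"],
-- ["rb", "sr", "in", "sn", "sb", "te", "i", "xe"]
-- ]
--
-- def get_real_position(element):
--     col = 1
--     row = 1
--
--     for i in elements:
--         for j in i:
--             if element == j:
--                 break
--             col += 1
--         if element == j: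
--             break
--         row += 1
--         col = 1
--
--     x = col
--     y = row
--
--     return (x, y)
-- ===== SOURCE B (Python) =====
-- elements =[
-- ["h", None, None, None, None, None, None, "he"],
-- ["li", "be", "b", "c", "n", "o", "f", "ne"],
-- ["na", "mg", "al", "si", "p", "s", "cl", "ar"],
-- ["k", "ca", "ga", "ge", "as", "se", "br", "kr"],
-- ["rb", "sr", "in", "sn", "sb", "te", "i", "xe"]
-- ]
--
-- # Flattened table built once; position recovered arithmetically from the flat index.
-- _FLAT = [cell for row in elements for cell in row]
--
-- def get_real_position(element):
--     try:
--         i = _FLAT.index(element)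
--     except ValueError:
--         # not in the table: the original's fall-through value
--         return (1, 6)
--     return (i % 8 + 1, i // 8 + 1)
-- ===== Notes on version B (the rewrite author's own statement) =====
-- stated objective: idiomatic
-- what changed: Replaces the nested row/column scan with leftover loop variables by a one-time flattened table plus a single .index lookup, recovering (col,row) arithmetically as (i%8+1, i//8+1); the original's not-found fall-through value (1,6) becomes an explicit default.
import Mathlib
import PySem

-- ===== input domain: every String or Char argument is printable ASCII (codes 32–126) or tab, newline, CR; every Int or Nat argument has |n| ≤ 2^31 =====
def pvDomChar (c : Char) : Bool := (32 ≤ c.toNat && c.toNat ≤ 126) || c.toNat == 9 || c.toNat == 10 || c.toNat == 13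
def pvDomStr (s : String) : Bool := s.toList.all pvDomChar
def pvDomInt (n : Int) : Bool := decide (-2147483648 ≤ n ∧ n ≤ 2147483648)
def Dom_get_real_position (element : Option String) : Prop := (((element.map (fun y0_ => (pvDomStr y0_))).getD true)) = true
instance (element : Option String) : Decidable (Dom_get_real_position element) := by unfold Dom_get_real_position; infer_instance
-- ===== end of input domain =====

-- B replaces A's nested scan (with its leftover loop variables) by a flattened table,
-- one index lookup and arithmetic (i%8+1, i//8+1); A's not-found fall-through (1,6) is B's explicit default.

-- ===== PORT A =====
-- inner 'for j in i' loop: threads col and the loop variable j; Bool = the inner break fired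
def pvInnerA (e : Option String) : List (Option String) → Int → Option String → Bool × Int × Option String
  | [], col, j => (false, col, j)
  | c :: rest, col, _ => if e = c then (true, col, c) else pvInnerA e rest (col + 1) c

-- outer 'for i in elements' loop; j persists across rows as in Python
def pvOuterA (e : Option String) : List (List (Option String)) → Int → Int → Option String → Int × Int
  | [], col, row, _ => (col, row)
  | r :: rest, col, row, j =>
    match pvInnerA e r col j with
    | (brk, col', j') =>
      if brk then (col', row)
      else if e = j' then (col', row)
      else pvOuterA e rest 1 (row + 1) j'

def pvElements : List (List (Option String)) :=
  [[some "h", none, none, none, none, none, none, some "he"],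
   [some "li", some "be", some "b", some "c", some "n", some "o", some "f", some "ne"],
   [some "na", some "mg", some "al", some "si", some "p", some "s", some "cl", some "ar"],
   [some "k", some "ca", some "ga", some "ge", some "as", some "se", some "br", some "kr"],
   [some "rb", some "sr", some "in", some "sn", some "sb", some "te", some "i", some "xe"]]

def get_real_position (element : Option String) : Int × Int :=
  pvOuterA element pvElements 1 1 none

-- ===== PORT B =====
-- the flattened table built once in Source B
def pvFlat : List (Option String) :=
  [some "h", none, none, none, none, none, none, some "he", some "li", some "be", some "b", some "c", some "n", some "o", some "f", some "ne", some "na", some "mg", some "al", some "si", some "p", some "s", some "cl", some "ar", some "k", some "ca", some "ga", some "ge", some "as", some "se", some "br", some "kr", some "rb", some "sr", some "in", some "sn", some "sb", some "te", some "i", some "xe"]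

def get_real_position_alt (element : Option String) : Int × Int :=
  match PySem.List.index? pvFlat element with
  | none => (1, 6)
  | some i => (PySem.Int.mod (i : Int) 8 + 1, PySem.Int.floordiv (i : Int) 8 + 1)

-- ===== PRECONDITION & SPEC =====
def Spec_get_real_position (element : Option String) (out : Int × Int) : Prop := out = get_real_position_alt element
instance (element : Option String) (out : Int × Int) : Decidable (Spec_get_real_position element out) := by unfold Spec_get_real_position; infer_instance

-- ===== CLAIM (what is proved, stated in full; the proofs are below) =====
def Claim_equal_get_real_position : Prop := ∀ (element : Option String), Dom_get_real_position element → Spec_get_real_position element (get_real_position element)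

-- ===== LEMMAS AND PROOFS =====

-- ===== VERDICT (by name: the statement is the Claim_ definition above) =====
theorem get_real_position_spec : Claim_equal_get_real_position := by
  intro element _
  unfold Spec_get_real_position
  match element with
  | none => decide
  | some s =>
    by_cases h1 : s = "h"
    · subst h1; decide
    by_cases h2 : s = "he"
    · subst h2; decide
    by_cases h3 : s = "li"
    · subst h3; decide
    by_cases h4 : s = "be"
    · subst h4; decide
    by_cases h5 : s = "b"
    · subst h5; decide
    by_cases h6 : s = "c"
    · subst h6; decide
    by_cases h7 : s = "n"
    · subst h7; decide
    by_cases h8 : s = "o"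
    · subst h8; decide
    by_cases h9 : s = "f"
    · subst h9; decide
    by_cases h10 : s = "ne"
    · subst h10; decide
    by_cases h11 : s = "na"
    · subst h11; decide
    by_cases h12 : s = "mg"
    · subst h12; decide
    by_cases h13 : s = "al"
    · subst h13; decide
    by_cases h14 : s = "si"
    · subst h14; decide
    by_cases h15 : s = "p"
    · subst h15; decide
    by_cases h16 : s = "s"
    · subst h16; decide
    by_cases h17 : s = "cl"
    · subst h17; decide
    by_cases h18 : s = "ar"
    · subst h18; decide
    by_cases h19 : s = "k"
    · subst h19; decide
    by_cases h20 : s = "ca"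
    · subst h20; decide
    by_cases h21 : s = "ga"
    · subst h21; decide
    by_cases h22 : s = "ge"
    · subst h22; decide
    by_cases h23 : s = "as"
    · subst h23; decide
    by_cases h24 : s = "se"
    · subst h24; decide
    by_cases h25 : s = "br"
    · subst h25; decide
    by_cases h26 : s = "kr"
    · subst h26; decide
    by_cases h27 : s = "rb"
    · subst h27; decide
    by_cases h28 : s = "sr"
    · subst h28; decide
    by_cases h29 : s = "in"
    · subst h29; decide
    by_cases h30 : s = "sn"
    · subst h30; decide
    by_cases h31 : s = "sb"
    · subst h31; decide
    by_cases h32 : s = "te"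
    · subst h32; decide
    by_cases h33 : s = "i"
    · subst h33; decide
    by_cases h34 : s = "xe"
    · subst h34; decide
    -- s matches no table entry: both ports return (1, 6)
    have hnot : (some s : Option String) ∉ pvFlat := by
      simp [pvFlat, h1, h2, h3, h4, h5, h6, h7, h8, h9, h10, h11, h12, h13, h14, h15, h16, h17, h18, h19, h20, h21, h22, h23, h24, h25, h26, h27, h28, h29, h30, h31, h32, h33, h34]
    have hB : get_real_position_alt (some s) = (1, 6) := by
      have h0 : PySem.List.index? pvFlat (some s) = none := by
        rw [PySem.List.index?_eq_none_iff]; exact hnot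
      unfold get_real_position_alt
      rw [h0]
    have hA : get_real_position (some s) = (1, 6) := by
      simp [get_real_position, pvElements, pvOuterA, pvInnerA, h1, h2, h3, h4, h5, h6, h7, h8, h9, h10, h11, h12, h13, h14, h15, h16, h17, h18, h19, h20, h21, h22, h23, h24, h25, h26, h27, h28, h29, h30, h31, h32, h33, h34]
    rw [hA, hB]
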